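-- pv_equiv track=rewrite | github.com/ecurtin2/Project-Euler | src/061.py | one_to_one
-- ===== SOURCE A (Python) =====
-- def one_to_one(sets, vals):
--     """True if each val is in exactly one set and each set contains exactly one value"""
--     for s in sets:
--         if len(s & set(vals)) != 1:
--             return False
--     for v in vals:
--         if sum(v in s for s in sets) != 1:
--             return False
--     return True
-- ===== SOURCE B (Python) =====
-- def one_to_one(sets, vals):
--     """True if each val is in exactly one set and each set contains exactly one value"""
--     distinct = list(dict.fromkeys(vals))
--     count = {}
--     for s in sets:
--         matches = [v for v in distinct if v in s]
--         if len(matches) != 1: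
--             return False
--         m = matches[0]
--         count[m] = count.get(m, 0) + 1
--     return all(count.get(v, 0) == 1 for v in distinct)
-- ===== Notes on version B (the rewrite author's own statement) =====
-- stated objective: alternative
-- what changed: Single pass over sets that records each set's unique matched value in a counter dict, then one final check over the distinct vals, instead of A's second full scan of vals with an inner scan over all sets per val.
import Mathlib
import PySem

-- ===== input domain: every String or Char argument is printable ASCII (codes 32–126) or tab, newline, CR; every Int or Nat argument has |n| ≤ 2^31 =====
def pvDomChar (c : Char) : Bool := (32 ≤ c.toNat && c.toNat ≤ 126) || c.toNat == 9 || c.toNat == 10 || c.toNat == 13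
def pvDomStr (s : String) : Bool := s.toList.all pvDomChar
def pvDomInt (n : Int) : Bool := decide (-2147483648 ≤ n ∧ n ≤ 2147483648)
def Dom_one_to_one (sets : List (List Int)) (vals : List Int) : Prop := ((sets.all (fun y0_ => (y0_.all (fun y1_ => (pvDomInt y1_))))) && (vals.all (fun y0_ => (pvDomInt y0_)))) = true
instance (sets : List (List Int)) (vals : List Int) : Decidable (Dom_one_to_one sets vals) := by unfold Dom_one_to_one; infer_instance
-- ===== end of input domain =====

-- B records each set's unique matched value in a counter during a single pass over sets,
-- then checks the counter over the distinct vals, replacing A's second full scan of vals.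


-- ===== PORT A =====
-- for s in sets: if len(s & set(vals)) != 1: return False   (s is a Python set → PySem.Set.ofList s)
-- for v in vals: if sum(v in s for s in sets) != 1: return False
def one_to_one (sets : List (List Int)) (vals : List Int) : Bool :=
  (sets.all (fun s =>
      PySem.Set.len (PySem.Set.inter (PySem.Set.ofList s) (PySem.Set.ofList vals)) == 1))
  && (vals.all (fun v =>
      ((sets.map (fun s => if s.contains v then (1:Int) else 0)).sum) == 1))

-- ===== PORT B =====
-- the loop 'for s in sets: matches = [v for v in distinct if v in s]; …; count[m] = count.get(m,0)+1'
-- (none = the early 'return False')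
def altGo (distinct : List Int) (sets : List (List Int)) (count : PySem.Dict Int Int) :
    Option (PySem.Dict Int Int) :=
  match sets with
  | [] => some count
  | s :: rest =>
    match distinct.filter (fun v => s.contains v) with
    | [m] => altGo distinct rest (count.insert m (count.getD m 0 + 1))
    | _ => none

def one_to_one_alt (sets : List (List Int)) (vals : List Int) : Bool :=
  let distinct := PySem.List.dedup vals
  match altGo distinct sets PySem.Dict.empty with
  | some c => distinct.all (fun v => c.getD v 0 == 1)
  | none => false

-- ===== PRECONDITION & SPEC =====
def Spec_one_to_one (sets : List (List Int)) (vals : List Int) (out : Bool) : Prop := out = one_to_one_alt sets vals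
instance (sets : List (List Int)) (vals : List Int) (out : Bool) : Decidable (Spec_one_to_one sets vals out) := by unfold Spec_one_to_one; infer_instance

-- ===== CLAIM (what is proved, stated in full; the proofs are below) =====
def Claim_equal_one_to_one : Prop := ∀ (sets : List (List Int)) (vals : List Int), Dom_one_to_one sets vals → Spec_one_to_one sets vals (one_to_one sets vals)

-- ===== LEMMAS AND PROOFS =====

-- |set(s) ∩ set(vals)| = |[v for v in set(vals) if v in s]| : both are nodup lists with the same members
theorem len_inter_eq_len_filter (s vals : List Int) :
    (PySem.Set.inter (PySem.Set.ofList s) (PySem.Set.ofList vals)).length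
      = ((PySem.Set.ofList vals).filter (fun v => s.contains v)).length := by
  apply List.Perm.length_eq
  rw [List.perm_ext_iff_of_nodup
      (PySem.Set.nodup_inter _ _ (PySem.Set.nodup_ofList s))
      ((PySem.Set.nodup_ofList vals).filter _)]
  intro a
  simp [PySem.Set.mem_inter, List.mem_filter, PySem.Set.mem_ofList]
  tauto

-- the loop returns None (= early False) iff some set has ≠ 1 matches
theorem altGo_eq_none_iff (distinct : List Int) (sets : List (List Int)) (c : PySem.Dict Int Int) :
    altGo distinct sets c = none ↔
      ∃ s ∈ sets, (distinct.filter (fun v => s.contains v)).length ≠ 1 := by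
  induction sets generalizing c with
  | nil => simp [altGo]
  | cons s rest ih =>
    cases hms : distinct.filter (fun v => s.contains v) with
    | nil =>
      refine iff_of_true ?_ ⟨s, by simp, by rw [hms]; simp⟩
      simp only [altGo, hms]
    | cons m t =>
      cases t with
      | cons m' t' =>
        refine iff_of_true ?_ ⟨s, by simp, by rw [hms]; simp⟩
        simp only [altGo, hms]
      | nil =>
        simp only [altGo, hms]
        rw [ih]
        constructor
        · rintro ⟨s', hs', hne⟩; exact ⟨s', by simp [hs'], hne⟩
        · rintro ⟨s', hs', hne⟩
          rcases List.mem_cons.mp hs' with rfl | h'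
          · exact absurd (by rw [hms]; rfl) hne
          · exact ⟨s', h', hne⟩

-- success invariant: the counter records, for each distinct val, how many processed sets contain it
theorem altGo_eq_some (distinct : List Int) (sets : List (List Int))
    (c c' : PySem.Dict Int Int)
    (h : ∀ s ∈ sets, (distinct.filter (fun v => s.contains v)).length = 1)
    (hgo : altGo distinct sets c = some c') :
    ∀ v ∈ distinct, c'.getD v 0
      = c.getD v 0 + ((sets.map (fun s => if s.contains v then (1:Int) else 0)).sum) := by
  induction sets generalizing c with
  | nil =>
    simp only [altGo, Option.some.injEq] at hgo
    subst hgo; simp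
  | cons s rest ih =>
    cases hms : distinct.filter (fun v => s.contains v) with
    | nil =>
      exact absurd (h s (by simp)) (by rw [hms]; simp)
    | cons m t =>
      cases t with
      | cons m' t' =>
        exact absurd (h s (by simp)) (by rw [hms]; simp)
      | nil =>
        simp only [altGo, hms] at hgo
        have hmem : ∀ v, v ∈ [m] ↔ v ∈ distinct ∧ s.contains v = true := by
          intro v; rw [← hms]; simp [List.mem_filter]
        intro v hv
        have hrest := ih (c.insert m (c.getD m 0 + 1))
          (fun s hs => h s (by simp [hs])) hgo v hv
        rw [hrest, PySem.Dict.getD_insert]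
        by_cases hvm : v = m
        · subst hvm
          have hvs : v ∈ s := by
            have := ((hmem v).mp (by simp)).2
            simpa using this
          simp [hvs]
          omega
        · have hvs : v ∉ s := by
            intro hmm
            exact hvm (by simpa using (hmem v).mpr ⟨hv, by simpa using hmm⟩)
          simp [hvm, hvs]

-- ===== VERDICT (by name: the statement is the Claim_ definition above) =====
theorem one_to_one_spec : Claim_equal_one_to_one := by
  intro sets vals _
  unfold Spec_one_to_one one_to_one one_to_one_alt
  simp only [PySem.List.dedup_eq_ofList]
  by_cases h : ∀ s ∈ sets, ((PySem.Set.ofList vals).filter (fun v => s.contains v)).length = 1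
  · -- every set has exactly one matched value
    have hall : (sets.all (fun s =>
        PySem.Set.len (PySem.Set.inter (PySem.Set.ofList s) (PySem.Set.ofList vals)) == 1)) = true := by
      rw [List.all_eq_true]
      intro s hs
      have h1 := h s hs
      simp only [PySem.Set.len, len_inter_eq_len_filter]
      simp at h1 ⊢
      omega
    rw [hall, Bool.true_and]
    cases hgo : altGo (PySem.Set.ofList vals) sets PySem.Dict.empty with
    | none =>
      rw [altGo_eq_none_iff] at hgo
      obtain ⟨s, hs, hne⟩ := hgo
      exact absurd (h s hs) hne
    | some c =>
      have hc := altGo_eq_some (PySem.Set.ofList vals) sets PySem.Dict.empty c h hgo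
      rw [Bool.eq_iff_iff]
      simp only [List.all_eq_true]
      constructor
      · intro hv v hvd
        have := hv v ((PySem.Set.mem_ofList vals v).mp hvd)
        rw [hc v hvd, PySem.Dict.getD_empty]
        simpa using this
      · intro hv v hvv
        have hvd := (PySem.Set.mem_ofList vals v).mpr hvv
        have := hv v hvd
        rw [hc v hvd, PySem.Dict.getD_empty] at this
        simpa using this
  · -- some set fails: both sides are False
    push Not at h
    obtain ⟨s, hs, hne⟩ := h
    have hall : (sets.all (fun s =>
        PySem.Set.len (PySem.Set.inter (PySem.Set.ofList s) (PySem.Set.ofList vals)) == 1)) = false := by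
      rw [List.all_eq_false]
      refine ⟨s, hs, ?_⟩
      have h1 := hne
      simp only [PySem.Set.len, len_inter_eq_len_filter]
      simp at h1 ⊢
      omega
    have hgo : altGo (PySem.Set.ofList vals) sets PySem.Dict.empty = none :=
      (altGo_eq_none_iff _ _ _).mpr ⟨s, hs, hne⟩
    rw [hall, hgo, Bool.false_and]
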